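-- pv_equiv track=rewrite | github.com/choiyunh/WALK-A-DAY | Programmers/Brute-Force/Level1/FakeTest.py | solution
-- ===== SOURCE A (Python) =====
-- def solution(answers):
--     answer = []
--
--     one = [1, 2, 3, 4, 5]
--     two = [2, 1, 2, 3, 2, 4, 2, 5]
--     three = [3, 3, 1, 1, 2, 2, 4, 4, 5, 5]
--
--     score = [0, 0, 0]
--
--     i = 0
--     for a in answers:
--         if a == one[i % len(one)]:
--             score[0] += 1
--         if a == two[i % len(two)]:
--             score[1] += 1
--         if a == three[i % len(three)]:
--             score[2] += 1
--         i += 1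
--
--     for i in range(len(score)):
--         if score[i] == max(score):
--             answer.append(i + 1)
--     return answer
-- ===== SOURCE B (Python) =====
-- def solution(answers):
--     PERIOD = 40  # lcm of the three pattern lengths (5, 8, 10)
--     hist = {}
--     for i, a in enumerate(answers):
--         key = (i % PERIOD, a)
--         hist[key] = hist.get(key, 0) + 1
--     patterns = [[1, 2, 3, 4, 5],
--                 [2, 1, 2, 3, 2, 4, 2, 5],
--                 [3, 3, 1, 1, 2, 2, 4, 4, 5, 5]]
--     scores = [sum(hist.get((j, p[j % len(p)]), 0) for j in range(PERIOD))
--               for p in patterns]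
--     best = max(scores)
--     return [k + 1 for k in range(3) if scores[k] == best]
-- ===== Notes on version B (the rewrite author's own statement) =====
-- stated objective: alternative
-- what changed: A's interleaved scan comparing every answer against all three patterns is replaced by a histogram: one pass builds a dict counting (index mod 40, answer) pairs (40 = lcm of the pattern lengths), and each pattern's score is then read off by 40 dict lookups instead of per-answer comparisons.
import Mathlib
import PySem

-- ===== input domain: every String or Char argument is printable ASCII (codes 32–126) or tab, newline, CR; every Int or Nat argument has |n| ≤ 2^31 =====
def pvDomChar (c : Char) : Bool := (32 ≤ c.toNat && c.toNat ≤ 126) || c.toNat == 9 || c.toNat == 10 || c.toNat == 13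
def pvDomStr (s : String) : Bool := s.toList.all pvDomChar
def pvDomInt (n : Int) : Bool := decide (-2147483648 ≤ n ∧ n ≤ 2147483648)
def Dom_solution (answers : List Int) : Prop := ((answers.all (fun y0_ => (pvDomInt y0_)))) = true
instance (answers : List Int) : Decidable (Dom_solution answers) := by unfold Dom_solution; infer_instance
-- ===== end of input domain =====

-- B replaces A's interleaved scan comparing each answer against all three patterns by a
-- position-histogram: one pass builds a dict counting (index mod 40, answer) pairs, and each
-- score is then read off by 40 dict lookups; objective: alternative data structure, same cost.

-- ===== PORT A =====
def oneP : List Int := [1, 2, 3, 4, 5]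
def twoP : List Int := [2, 1, 2, 3, 2, 4, 2, 5]
def threeP : List Int := [3, 3, 1, 1, 2, 2, 4, 4, 5, 5]

-- the body of A's loop over `answers` (state: i, score[0], score[1], score[2])
def stepA (st : Nat × Int × Int × Int) (a : Int) : Nat × Int × Int × Int :=
  match st with
  | (i, s0, s1, s2) =>
    (i + 1,
     if a = oneP.getD (i % oneP.length) 0 then s0 + 1 else s0,
     if a = twoP.getD (i % twoP.length) 0 then s1 + 1 else s1,
     if a = threeP.getD (i % threeP.length) 0 then s2 + 1 else s2)

def solution (answers : List Int) : List Int :=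
  let st := answers.foldl stepA (0, 0, 0, 0)
  let score : List Int := [st.2.1, st.2.2.1, st.2.2.2]
  (List.range score.length).foldl
    (fun ans i => if score.getD i 0 = (score.max?).getD 0 then ans ++ [(i : Int) + 1] else ans) []

-- ===== PORT B =====
-- hist[key] = hist.get(key, 0) + 1   over enumerate(answers), key = (i % 40, a)
def histB (answers : List Int) : PySem.Dict (Int × Int) Int :=
  (PySem.List.enumerate answers 0).foldl
    (fun d q => d.insert (PySem.Int.mod q.1 40, q.2)
                  (d.getD (PySem.Int.mod q.1 40, q.2) 0 + 1))
    PySem.Dict.empty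

-- sum(hist.get((j, p[j % len(p)]), 0) for j in range(40))
def scoreB (hist : PySem.Dict (Int × Int) Int) (p : List Int) : Int :=
  ((PySem.List.pyRange 0 40 1).map
    (fun j => hist.getD (j, PySem.List.pyGetD p (PySem.Int.mod j (p.length : Int)) 0) 0)).sum

def solution_alt (answers : List Int) : List Int :=
  let hist := histB answers
  let scores := [[1, 2, 3, 4, 5],
                 [2, 1, 2, 3, 2, 4, 2, 5],
                 [3, 3, 1, 1, 2, 2, 4, 4, 5, 5]].map (fun p => scoreB hist p)
  let best := (scores.max?).getD 0
  ((PySem.List.pyRange 0 3 1).filter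
     (fun k => PySem.List.pyGetD scores k 0 == best)).map (fun k => k + 1)

-- ===== PRECONDITION & SPEC =====
def Spec_solution (answers : List Int) (out : List Int) : Prop := out = solution_alt answers
instance (answers : List Int) (out : List Int) : Decidable (Spec_solution answers out) := by unfold Spec_solution; infer_instance

-- ===== CLAIM (what is proved, stated in full; the proofs are below) =====
def Claim_equal_solution : Prop := ∀ (answers : List Int), Dom_solution answers → Spec_solution answers (solution answers)

-- ===== LEMMAS AND PROOFS =====

/-- count of matches of pattern `p` against `l`, positions starting at `i`. -/
def cnt (p : List Int) : Nat → List Int → Int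
  | _, [] => 0
  | i, x :: l => (if x = p.getD (i % p.length) 0 then 1 else 0) + cnt p (i + 1) l

theorem afold : ∀ (l : List Int) (i : Nat) (s0 s1 s2 : Int),
    l.foldl stepA (i, s0, s1, s2)
      = (i + l.length, s0 + cnt oneP i l, s1 + cnt twoP i l, s2 + cnt threeP i l) := by
  intro l
  induction l with
  | nil => intro i s0 s1 s2; simp [cnt]
  | cons x l ih =>
    intro i s0 s1 s2
    simp only [List.foldl_cons, stepA, ih, cnt, List.length_cons]
    refine Prod.ext (by omega) (Prod.ext ?_ (Prod.ext ?_ ?_)) <;>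
      (simp only []; split_ifs <;> ring)

theorem sum_ind_zero (g : Int → Int) (r v : Int) :
    ∀ (R : List Int), r ∉ R →
      (R.map (fun j => if ((r, v) : Int × Int) == (j, g j) then (1 : Int) else 0)).sum = 0 := by
  intro R
  induction R with
  | nil => intro _; simp
  | cons j R ih =>
    intro h
    have hj : r ≠ j := by intro hh; exact h (hh ▸ List.mem_cons_self)
    have hb : (((r, v) : Int × Int) == (j, g j)) = false := by
      simp [Prod.ext_iff, hj]
    simp only [List.map_cons, List.sum_cons, hb, Bool.false_eq_true, if_false, zero_add]
    exact ih (fun hm => h (List.mem_cons_of_mem _ hm))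

theorem sum_ind (g : Int → Int) (r v : Int) :
    ∀ (R : List Int), R.Nodup → r ∈ R →
      (R.map (fun j => if ((r, v) : Int × Int) == (j, g j) then (1 : Int) else 0)).sum
        = if v = g r then 1 else 0 := by
  intro R
  induction R with
  | nil => intro _ h; cases h
  | cons j R ih =>
    intro hnd hmem
    rcases List.nodup_cons.mp hnd with ⟨hjn, hnd'⟩
    by_cases hj : j = r
    · subst hj
      rw [List.map_cons, List.sum_cons, sum_ind_zero g j v R hjn, add_zero]
      by_cases hv : v = g j
      · simp [hv]
      · have hb : (((j, v) : Int × Int) == (j, g j)) = false := by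
          simp [Prod.ext_iff, hv]
        simp [hb, hv]
    · have hm' : r ∈ R := by
        rcases List.mem_cons.mp hmem with h | h
        · exact absurd h.symm hj
        · exact h
      have hb : (((r, v) : Int × Int) == (j, g j)) = false := by
        simp [Prod.ext_iff, Ne.symm hj]
      simp only [List.map_cons, List.sum_cons, hb, if_false, ih hnd' hm', zero_add,
        Bool.false_eq_true]

/-- the keyed positions list underlying the histogram. -/
def keysOf (l : List Int) (i0 : Nat) : List (Int × Int) :=
  (PySem.List.enumerate l (i0 : Int)).map (fun q => (PySem.Int.mod q.1 40, q.2))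

theorem keysOf_cons (x : Int) (l : List Int) (i0 : Nat) :
    keysOf (x :: l) i0 = (((i0 % 40 : Nat) : Int), x) :: keysOf l (i0 + 1) := by
  simp only [keysOf, PySem.List.enumerate_cons, List.map_cons]
  have h1 : PySem.Int.mod (i0 : Int) 40 = ((i0 % 40 : Nat) : Int) := by
    rw [PySem.Int.mod_eq_emod_of_pos (by norm_num)]
    push_cast
    rfl
  have h2 : ((i0 : Int) + 1) = (((i0 + 1 : Nat)) : Int) := by push_cast; ring
  rw [h1, h2]

theorem score_cnt (p : List Int) (hdvd : p.length ∣ 40) :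
    ∀ (l : List Int) (i0 : Nat),
      ((PySem.List.pyRange 0 40 1).map
        (fun j => ((keysOf l i0).count
            (j, PySem.List.pyGetD p (PySem.Int.mod j (p.length : Int)) 0) : Int))).sum
        = cnt p i0 l := by
  intro l
  induction l with
  | nil =>
    intro i0
    simp [keysOf, cnt, PySem.List.enumerate_nil]
  | cons x l ih =>
    intro i0
    rw [keysOf_cons]
    have hsplit : ∀ j : Int,
        (((((i0 % 40 : Nat) : Int), x) :: keysOf l (i0 + 1)).count
            (j, PySem.List.pyGetD p (PySem.Int.mod j (p.length : Int)) 0) : Int)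
          = ((keysOf l (i0 + 1)).count
              (j, PySem.List.pyGetD p (PySem.Int.mod j (p.length : Int)) 0) : Int)
            + (if ((((i0 % 40 : Nat) : Int), x) : Int × Int)
                  == (j, PySem.List.pyGetD p (PySem.Int.mod j (p.length : Int)) 0)
               then (1 : Int) else 0) := by
      intro j
      rw [List.count_cons]
      split_ifs <;> push_cast <;> try ring
    calc ((PySem.List.pyRange 0 40 1).map _).sum
        = ((PySem.List.pyRange 0 40 1).map
            (fun j => ((keysOf l (i0 + 1)).count
                (j, PySem.List.pyGetD p (PySem.Int.mod j (p.length : Int)) 0) : Int)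
              + (if ((((i0 % 40 : Nat) : Int), x) : Int × Int)
                    == (j, PySem.List.pyGetD p (PySem.Int.mod j (p.length : Int)) 0)
                 then (1 : Int) else 0))).sum := by
          exact congrArg List.sum (List.map_congr_left (fun j _ => hsplit j))
      _ = cnt p (i0 + 1) l
            + ((PySem.List.pyRange 0 40 1).map
                (fun j => if ((((i0 % 40 : Nat) : Int), x) : Int × Int)
                    == (j, PySem.List.pyGetD p (PySem.Int.mod j (p.length : Int)) 0)
                  then (1 : Int) else 0)).sum := by
          rw [PySem.List.sum_map_add_int, ih]
      _ = cnt p i0 (x :: l) := by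
          rw [sum_ind (fun j => PySem.List.pyGetD p (PySem.Int.mod j (p.length : Int)) 0)
              (((i0 % 40 : Nat) : Int)) x (PySem.List.pyRange 0 40 1)
              (PySem.List.nodup_pyRange_one 0 40)
              (by rw [PySem.List.mem_pyRange_one]
                  constructor
                  · positivity
                  · exact_mod_cast Nat.mod_lt i0 (by norm_num))]
          have hg : PySem.List.pyGetD p (PySem.Int.mod (((i0 % 40 : Nat) : Int)) (p.length : Int)) 0
              = p.getD (i0 % p.length) 0 := by
            rw [PySem.Int.mod_natCast, PySem.List.pyGetD_natCast,
              Nat.mod_mod_of_dvd i0 hdvd]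
          rw [hg]
          simp only [cnt]
          ring
  
theorem histB_bridge : ∀ (l : List (Int × Int)) (d : PySem.Dict (Int × Int) Int),
    l.foldl (fun d q => d.insert (PySem.Int.mod q.1 40, q.2)
                (d.getD (PySem.Int.mod q.1 40, q.2) 0 + 1)) d
      = (l.map (fun q => (PySem.Int.mod q.1 40, q.2))).foldl
          (fun d x => d.insert x (d.getD x 0 + 1)) d := by
  intro l
  induction l with
  | nil => intro d; rfl
  | cons q l ih => intro d; simp only [List.foldl_cons, List.map_cons, ih]

theorem hist_getD (answers : List Int) (k : Int × Int) :
    (histB answers).getD k 0 = ((keysOf answers 0).count k : Int) := by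
  unfold histB keysOf
  simp only [Nat.cast_zero]
  rw [histB_bridge]
  rw [PySem.Dict.getD_foldl_insert_add_one, PySem.Dict.getD_empty, zero_add]

theorem scoreB_eq (answers : List Int) (p : List Int) (hdvd : p.length ∣ 40) :
    scoreB (histB answers) p = cnt p 0 answers := by
  unfold scoreB
  rw [← score_cnt p hdvd answers 0]
  exact congrArg List.sum (List.map_congr_left (fun j _ => by rw [hist_getD]))

theorem final_eq (x y z : Int) :
    (List.range 3).foldl
      (fun ans i => if [x, y, z].getD i 0 = ([x, y, z].max?).getD 0 then ans ++ [(i : Int) + 1] else ans) []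
    = ((PySem.List.pyRange 0 3 1).filter
        (fun k => PySem.List.pyGetD [x, y, z] k 0 == ([x, y, z].max?).getD 0)).map (fun k => k + 1) := by
  have key : ∀ m : Int,
      (List.range 3).foldl
        (fun ans i => if [x, y, z].getD i 0 = m then ans ++ [(i : Int) + 1] else ans) []
      = ((PySem.List.pyRange 0 3 1).filter
          (fun k => PySem.List.pyGetD [x, y, z] k 0 == m)).map (fun k => k + 1) := by
    intro m
    have hR : PySem.List.pyRange 0 3 1 = [0, 1, 2] := by decide
    by_cases hx : x = m <;> by_cases hy : y = m <;> by_cases hz : z = m <;>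
      simp [List.range_succ, hR, PySem.List.pyGetD, hx, hy, hz]
  exact key _

-- ===== VERDICT (by name: the statement is the Claim_ definition above) =====
theorem solution_spec : Claim_equal_solution := by
  intro answers _
  unfold Spec_solution solution solution_alt
  rw [afold]
  simp only [List.map_cons, List.map_nil]
  rw [scoreB_eq answers _ (by decide), scoreB_eq answers _ (by decide),
    scoreB_eq answers _ (by decide)]
  simp only [zero_add, List.length_cons, List.length_nil,
    show ([1, 2, 3, 4, 5] : List Int) = oneP from rfl,
    show ([2, 1, 2, 3, 2, 4, 2, 5] : List Int) = twoP from rfl,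
    show ([3, 3, 1, 1, 2, 2, 4, 4, 5, 5] : List Int) = threeP from rfl]
  exact final_eq _ _ _
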